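-- pv_equiv track=rewrite | github.com/Nelu251/LFPC | Lab3.py | delete_terminals
-- ===== SOURCE A (Python) =====
-- def split_t(string):
--     splitted = []
--     old_s = ''
--     for s in string:
--         if s.isdigit():
--            old_s += s
--         else:
--             splitted.append(old_s)
--             old_s = s
--     splitted.remove('')
--     splitted.append(old_s)
--     return splitted
--
-- def find_by_value(rule, value):
--     for key, v in rule.items():
--         if v == value:
--             return key
--     return None
--
-- def delete_terminals(derivations):
--     # Remove non single terminal symbols
--     X = 'X'
--     new_derivations = {}
--     for key, value in derivations.items():
--         for i, v in enumerate(value):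
--             variables = split_t(v)
--             if len(variables) == 2:
--                 for letter in variables:
--                     if letter not in derivations.keys():
--                         existing = find_by_value(new_derivations, letter)
--                         if existing:
--                             derivations[key][i] = derivations[key][i].replace(letter, existing)
--                         else:
--                             new_X = X + str(len(new_derivations)+1)
--                             new_derivations[new_X] = letter
--                             derivations[key][i] = derivations[key][i].replace(letter, new_X)
--     for key, value in new_derivations.items():
--         derivations[key] = [value]
--     return derivations
-- ===== SOURCE B (Python) =====
-- # Two-pass re-implementation: pass 1 builds the terminal->X-name table once (no
-- # reverse value scan), pass 2 rewrites the productions with that table.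
-- # Mutates `derivations` in place like the original (value lists are replaced,
-- # not edited element-wise) and returns it.
--
-- def _tokens(s):
--     # one pass: a digit extends the current (last) token, any other char starts one;
--     # leading digits extend no token and are dropped
--     toks = []
--     for ch in s:
--         if ch.isdigit() and toks:
--             toks[-1] += ch
--         elif not ch.isdigit():
--             toks.append(ch)
--     return toks
--
--
-- def _subst(v, toks, derivations, mapping):
--     for t in toks:
--         if t not in derivations:
--             v = v.replace(t, mapping[t])
--     return v
--
--
-- def delete_terminals(derivations):
--     mapping = {}   # terminal -> its new variable name, in first-encounter order
--     info = []      # per key: token list of each 2-token production, else None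
--     for key, value in derivations.items():
--         toks_list = []
--         for v in value:
--             toks = _tokens(v)
--             if len(toks) == 2:
--                 toks_list.append(toks)
--                 for t in toks:
--                     if t not in derivations and t not in mapping:
--                         mapping[t] = 'X' + str(len(mapping) + 1)
--             else:
--                 toks_list.append(None)
--         info.append(toks_list)
--     for (key, value), toks_list in zip(list(derivations.items()), info):
--         derivations[key] = [
--             v if toks is None else _subst(v, toks, derivations, mapping)
--             for v, toks in zip(value, toks_list)
--         ]
--     for t, name in mapping.items():
--         derivations[name] = [t]
--     return derivations
-- ===== Notes on version B (the rewrite author's own statement) =====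
-- stated objective: alternative
-- what changed: Single interleaved pass with a linear reverse value-scan (find_by_value) per terminal is replaced by two passes: pass 1 tokenises each production once and builds a forward dict terminal->X-name in first-encounter order, pass 2 rewrites the 2-token productions with that finished table; the reverse scan disappears.
import Mathlib
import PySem

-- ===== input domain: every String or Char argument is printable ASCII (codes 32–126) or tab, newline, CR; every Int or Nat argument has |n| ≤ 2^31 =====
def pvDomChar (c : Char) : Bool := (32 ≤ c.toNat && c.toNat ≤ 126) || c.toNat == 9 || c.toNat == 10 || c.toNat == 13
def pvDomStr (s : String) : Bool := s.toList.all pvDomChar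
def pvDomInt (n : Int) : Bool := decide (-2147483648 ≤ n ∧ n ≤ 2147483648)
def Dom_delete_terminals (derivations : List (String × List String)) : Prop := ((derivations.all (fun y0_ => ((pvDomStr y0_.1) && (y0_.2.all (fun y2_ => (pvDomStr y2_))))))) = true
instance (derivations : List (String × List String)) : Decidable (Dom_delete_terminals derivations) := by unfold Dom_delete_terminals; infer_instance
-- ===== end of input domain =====

-- B restructures A's single interleaved pass into two passes (tokenise & build the
-- terminal→X-name table first, rewrite afterwards); return value proved equal on Pre_;
-- both Pythons mutate `derivations` in place (B replaces the value lists instead of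
-- editing them element-wise).

-- ===== PORT A =====
-- shared leaf helper: both Pythons build new variable names as 'X' + str(n)
def xName (n : Int) : String := String.ofList ('X' :: PySem.Int.toChars n)

-- split_t's loop body; strings are handled as their char lists (exact)
def splitStep (st : List (List Char) × List Char) (c : Char) : List (List Char) × List Char :=
  if PySem.Chars.isdigit c then (st.1, st.2 ++ [c]) else (st.1 ++ [st.2], [c])

-- split_t; none = the ValueError of splitted.remove('')
def splitT (s : String) : Option (List String) :=
  let st := s.toList.foldl splitStep ([], [])
  match PySem.List.remove? st.1 ([] : List Char) with
  | none => none
  | some l => some ((l ++ [st.2]).map String.ofList)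

-- find_by_value over new_derivations.items() (first key whose value matches)
def findByValue (rule : List (String × String)) (value : String) : Option String :=
  match rule with
  | [] => none
  | p :: rest => if p.2 == value then some p.1 else findByValue rest value

-- body of `for letter in variables`; new_derivations kept as its items list
-- (new_X is fresh — numbered past every stored name — so dict assignment appends)
def stepLetter (keys : List String) (st : String × List (String × String)) (letter : String) :
    String × List (String × String) :=
  if keys.contains letter then st
  else
    let createNew :=
      let newX := xName ((st.2.length : Int) + 1)
      (PySem.Str.replace st.1 letter newX, st.2 ++ [(newX, letter)])
    match findByValue st.2 letter with
    | some existing =>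
        -- Python truthiness `if existing:`: '' is falsy (stored keys are X-names)
        if existing == "" then createNew
        else (PySem.Str.replace st.1 letter existing, st.2)
    | none => createNew

-- inner loop `for i, v in enumerate(value)` (only index i is rewritten, so the
-- updated strings are threaded element-wise)
def procValue (keys : List String) : List String → List (String × String) →
    Option (List String × List (String × String))
  | [], nd => some ([], nd)
  | v :: rest, nd =>
    match splitT v with
    | none => none
    | some vars =>
      let st := if vars.length == 2 then vars.foldl (stepLetter keys) (v, nd) else (v, nd)
      match procValue keys rest st.2 with
      | none => none
      | some r => some (st.1 :: r.1, r.2)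

-- outer loop `for key, value in derivations.items()`
def procEntries (keys : List String) : List (String × List String) → List (String × String) →
    Option (List (String × List String) × List (String × String))
  | [], nd => some ([], nd)
  | kv :: rest, nd =>
    match procValue keys kv.2 nd with
    | none => none
    | some rv =>
      match procEntries keys rest rv.2 with
      | none => none
      | some r => some ((kv.1, rv.1) :: r.1, r.2)

def delete_terminals (derivations : List (String × List String)) : List (String × List String) :=
  match procEntries (derivations.map Prod.fst) derivations [] with
  | none => []  -- split_t raised ValueError: excluded by Pre_
  | some r => (r.1 |> PySem.Dict.mk |> (r.2.foldl (fun d p => d.insert p.1 [p.2]) ·)).items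

-- ===== PORT B =====
-- Source B's _tokens loop body: a digit extends the current (last) token, any other
-- char starts one; leading digits extend no token and are dropped
def tokStep (toks : List (List Char)) (c : Char) : List (List Char) :=
  if PySem.Chars.isdigit c then
    if toks.isEmpty then toks else toks.dropLast ++ [toks.getLastD [] ++ [c]]
  else toks ++ [[c]]

def tokensB (s : String) : List String := (s.toList.foldl tokStep []).map String.ofList

-- pass 1, per token: record a fresh terminal in the mapping dict
def pass1Tok (keys : List String) (m : PySem.Dict String String) (t : String) :
    PySem.Dict String String :=
  if !(keys.contains t) && !(m.contains t) then m.insert t (xName ((m.size : Int) + 1)) else m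

-- pass 1, per production: token lists (for 2-token productions) + grown mapping
def pass1Value (keys : List String) : List String → PySem.Dict String String →
    List (Option (List String)) × PySem.Dict String String
  | [], m => ([], m)
  | v :: rest, m =>
    let toks := tokensB v
    if toks.length == 2 then
      let r := pass1Value keys rest (toks.foldl (pass1Tok keys) m)
      (some toks :: r.1, r.2)
    else
      let r := pass1Value keys rest m
      (none :: r.1, r.2)

def pass1 (keys : List String) : List (String × List String) → PySem.Dict String String →
    List (List (Option (List String))) × PySem.Dict String String
  | [], m => ([], m)
  | kv :: rest, m =>
    let rv := pass1Value keys kv.2 m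
    let r := pass1 keys rest rv.2
    (rv.1 :: r.1, r.2)

-- Source B's _subst
def substB (keys : List String) (m : PySem.Dict String String) (v : String)
    (toks : List String) : String :=
  toks.foldl (fun s t =>
    if keys.contains t then s
    else match m.get? t with
      | some n => PySem.Str.replace s t n
      | none => s) v  -- none unreachable: pass 1 recorded every such t

-- pass 2, per key: the rebuilt value list
def pass2Value (keys : List String) (m : PySem.Dict String String) (value : List String)
    (os : List (Option (List String))) : List String :=
  (value.zip os).map (fun p =>
    match p.2 with
    | none => p.1
    | some toks => substB keys m p.1 toks)

def delete_terminals_alt (derivations : List (String × List String)) : List (String × List String) :=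
  let keys := derivations.map Prod.fst
  let r := pass1 keys derivations PySem.Dict.empty
  let d := (derivations.zip r.1).map (fun p => (p.1.1, pass2Value keys r.2 p.1.2 p.2))
  (r.2.items.foldl (fun dd q => dd.insert q.2 [q.1]) (PySem.Dict.mk d)).items

-- ===== PRECONDITION & SPEC =====
-- split_t (hence A) raises ValueError exactly when some production string is empty or
-- starts with a digit; Pre_ excludes exactly those inputs.
def preV (v : String) : Bool :=
  match v.toList with
  | [] => false
  | c :: _ => !PySem.Chars.isdigit c

def Pre_delete_terminals (derivations : List (String × List String)) : Prop :=
  (derivations.all (fun kv => kv.2.all preV)) = true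
instance (derivations : List (String × List String)) : Decidable (Pre_delete_terminals derivations) := by
  unfold Pre_delete_terminals; infer_instance

def pvWitness_delete_terminals : (List (String × List String)) := [("S", ["aA", "b"])]

def Spec_delete_terminals (derivations : List (String × List String)) (out : List (String × List String)) : Prop :=
  out = delete_terminals_alt derivations
instance (derivations : List (String × List String)) (out : List (String × List String)) : Decidable (Spec_delete_terminals derivations out) := by
  unfold Spec_delete_terminals; infer_instance

-- ===== CLAIM (what is proved, stated in full; the proofs are below) =====
def Claim_equal_delete_terminals : Prop := ∀ (derivations : List (String × List String)), Dom_delete_terminals derivations → Pre_delete_terminals derivations → Spec_delete_terminals derivations (delete_terminals derivations)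

-- ===== LEMMAS AND PROOFS =====

-- A's new_derivations is B's mapping with each pair flipped
def swapL (l : List (String × String)) : List (String × String) := l.map (fun p => (p.2, p.1))

-- every stored name is an X-name, hence nonempty: the truthiness branch never fires
def InvL (l : List (String × String)) : Prop := ∀ p ∈ l, p.2 ≠ ""

-- the mapping only grows by appending entries
def ExtL (l L : List (String × String)) : Prop := ∃ e, L = l ++ e

lemma extL_refl (l : List (String × String)) : ExtL l l := ⟨[], (List.append_nil l).symm⟩

lemma extL_trans {a b c : List (String × String)} (h1 : ExtL a b) (h2 : ExtL b c) : ExtL a c := by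
  obtain ⟨e1, rfl⟩ := h1; obtain ⟨e2, rfl⟩ := h2; exact ⟨e1 ++ e2, by simp⟩

lemma xName_ne_empty (n : Int) : xName n ≠ "" := by
  intro h
  have h2 := congrArg String.toList h
  simp [xName] at h2

-- ---- tokenizer agreement: split_t's fold vs Source B's fold ----

lemma tokStep_shift (cs : List Char) :
    ∀ (a : List (List Char)) (cur : List Char),
    cs.foldl tokStep (a ++ [cur]) = a ++ cs.foldl tokStep [cur] := by
  induction cs with
  | nil => intro a cur; rfl
  | cons c cs ih =>
    intro a cur
    simp only [List.foldl_cons]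
    by_cases h : PySem.Chars.isdigit c = true
    · have h1 : tokStep (a ++ [cur]) c = a ++ [cur ++ [c]] := by
        simp [tokStep, h]
      have h2 : tokStep [cur] c = [cur ++ [c]] := by simp [tokStep, h]
      rw [h1, h2, ih a (cur ++ [c])]
    · have h1 : tokStep (a ++ [cur]) c = (a ++ [cur]) ++ [[c]] := by simp [tokStep, h]
      have h2 : tokStep [cur] c = [cur] ++ [[c]] := by simp [tokStep, h]
      rw [h1, h2, ih (a ++ [cur]) [c], ih [cur] [c], List.append_assoc]

lemma splitStep_shift (cs : List Char) :
    ∀ (sp : List (List Char)) (cur : List Char),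
    cs.foldl splitStep (sp, cur)
      = (sp ++ (cs.foldl splitStep ([], cur)).1, (cs.foldl splitStep ([], cur)).2) := by
  induction cs with
  | nil => intro sp cur; simp
  | cons c cs ih =>
    intro sp cur
    simp only [List.foldl_cons]
    by_cases h : PySem.Chars.isdigit c = true
    · have h1 : splitStep (sp, cur) c = (sp, cur ++ [c]) := by simp [splitStep, h]
      have h2 : splitStep ([], cur) c = ([], cur ++ [c]) := by simp [splitStep, h]
      rw [h1, h2, ih sp (cur ++ [c])]
    · have h1 : splitStep (sp, cur) c = (sp ++ [cur], [c]) := by simp [splitStep, h]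
      have h2 : splitStep ([], cur) c = ([cur], [c]) := by simp [splitStep, h]
      rw [h1, h2, ih (sp ++ [cur]) [c], ih [cur] [c], List.append_assoc]

lemma splitFold_eq_tokFold (cs : List Char) :
    ∀ cur : List Char,
    (cs.foldl splitStep ([], cur)).1 ++ [(cs.foldl splitStep ([], cur)).2]
      = cs.foldl tokStep [cur] := by
  induction cs with
  | nil => intro cur; rfl
  | cons c cs ih =>
    intro cur
    simp only [List.foldl_cons]
    by_cases h : PySem.Chars.isdigit c = true
    · have h1 : splitStep ([], cur) c = ([], cur ++ [c]) := by simp [splitStep, h]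
      have h2 : tokStep [cur] c = [cur ++ [c]] := by simp [tokStep, h]
      rw [h1, h2, ih (cur ++ [c])]
    · have h1 : splitStep ([], cur) c = ([cur], [c]) := by simp [splitStep, h]
      have h2 : tokStep [cur] c = [cur] ++ [[c]] := by simp [tokStep, h]
      rw [h1, h2, splitStep_shift, tokStep_shift]
      simp only [List.append_assoc]
      rw [ih [c]]

lemma splitT_eq_tokensB (s : String) (h : preV s = true) : splitT s = some (tokensB s) := by
  unfold preV at h
  unfold splitT tokensB
  cases hs : s.toList with
  | nil => rw [hs] at h; cases h
  | cons c cs =>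
    rw [hs] at h
    have hd : PySem.Chars.isdigit c = false := by
      have h' : (!PySem.Chars.isdigit c) = true := h
      simpa using h'
    simp only [List.foldl_cons]
    have h0 : splitStep ([], []) c = ([[]], [c]) := by simp [splitStep, hd]
    have hb : tokStep [] c = [[c]] := by simp [tokStep, hd]
    rw [h0, hb]
    rw [splitStep_shift cs [[]] [c]]
    dsimp only
    rw [show ([[]] : List (List Char)) ++ (cs.foldl splitStep ([], [c])).1
          = ([] : List Char) :: (cs.foldl splitStep ([], [c])).1 from rfl]
    rw [PySem.List.remove?_cons_self]
    dsimp only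
    rw [splitFold_eq_tokFold cs [c]]

-- ---- assoc-list / Dict lookup facts ----

lemma get?_append_or (l e : List (String × String)) (t : String) :
    (PySem.Dict.mk (l ++ e)).get? t
      = ((PySem.Dict.mk l).get? t).or ((PySem.Dict.mk e).get? t) := by
  induction l with
  | nil => simp [PySem.Dict.get?]
  | cons p l ih =>
    obtain ⟨k, v⟩ := p
    rw [List.cons_append, PySem.Dict.get?_mk_cons, PySem.Dict.get?_mk_cons]
    split
    · simp
    · exact ih

lemma findByValue_swap (l : List (String × String)) (t : String) :
    findByValue (swapL l) t = (PySem.Dict.mk l).get? t := by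
  induction l with
  | nil => rfl
  | cons p l ih =>
    obtain ⟨k, v⟩ := p
    simp only [swapL, List.map_cons]
    rw [findByValue, PySem.Dict.get?_mk_cons]
    dsimp only
    split
    · rfl
    · exact ih

lemma get?_of_extL {l L : List (String × String)} (h : ExtL l L) {t v : String}
    (hv : (PySem.Dict.mk l).get? t = some v) : (PySem.Dict.mk L).get? t = some v := by
  obtain ⟨e, rfl⟩ := h
  rw [get?_append_or, hv]
  rfl

-- ---- mapping growth through pass 1 ----

lemma pass1Tok_ext (keys : List String) (m : PySem.Dict String String) (t : String) :
    ExtL m.items (pass1Tok keys m t).items := by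
  unfold pass1Tok
  split
  · rename_i h
    simp only [Bool.and_eq_true, Bool.not_eq_true'] at h
    exact ⟨_, PySem.Dict.items_insert_of_not_contains m _ h.2⟩
  · exact extL_refl _

lemma pass1Tok_inv (keys : List String) (m : PySem.Dict String String) (t : String)
    (h : InvL m.items) : InvL (pass1Tok keys m t).items := by
  unfold pass1Tok
  split
  · rename_i hc
    simp only [Bool.and_eq_true, Bool.not_eq_true'] at hc
    rw [PySem.Dict.items_insert_of_not_contains m _ hc.2]
    intro p hp
    rcases List.mem_append.mp hp with h1 | h1
    · exact h p h1
    · have : p = (t, xName ((m.size : Int) + 1)) := by simpa using h1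
      rw [this]
      exact xName_ne_empty _
  · exact h

lemma foldl_pass1Tok_ext (keys : List String) (toks : List String) :
    ∀ m, ExtL m.items ((toks.foldl (pass1Tok keys) m).items) := by
  induction toks with
  | nil => intro m; exact extL_refl _
  | cons t toks ih =>
    intro m
    simp only [List.foldl_cons]
    exact extL_trans (pass1Tok_ext keys m t) (ih (pass1Tok keys m t))

lemma foldl_pass1Tok_inv (keys : List String) (toks : List String) :
    ∀ m, InvL m.items → InvL ((toks.foldl (pass1Tok keys) m).items) := by
  induction toks with
  | nil => intro m h; exact h
  | cons t toks ih =>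
    intro m h
    simp only [List.foldl_cons]
    exact ih (pass1Tok keys m t) (pass1Tok_inv keys m t h)

lemma pass1Value_ext (keys : List String) (value : List String) :
    ∀ m, ExtL m.items ((pass1Value keys value m).2.items) := by
  induction value with
  | nil => intro m; exact extL_refl _
  | cons v rest ih =>
    intro m
    unfold pass1Value
    dsimp only
    split
    · exact extL_trans (foldl_pass1Tok_ext keys (tokensB v) m) (ih _)
    · exact ih m

lemma pass1Value_inv (keys : List String) (value : List String) :
    ∀ m, InvL m.items → InvL ((pass1Value keys value m).2.items) := by
  induction value with
  | nil => intro m h; exact h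
  | cons v rest ih =>
    intro m h
    unfold pass1Value
    dsimp only
    split
    · exact ih _ (foldl_pass1Tok_inv keys (tokensB v) m h)
    · exact ih m h

-- ---- the per-production loop: A's interleaved step = B's replace with the final table ----

lemma substB_cons (keys : List String) (M : PySem.Dict String String) (s t : String)
    (toks : List String) :
    substB keys M s (t :: toks)
      = substB keys M (if keys.contains t then s
          else match M.get? t with
            | some n => PySem.Str.replace s t n
            | none => s) toks := rfl

lemma step_toks (keys : List String) (toks : List String) :
    ∀ (s : String) (m : PySem.Dict String String) (L : List (String × String)),
    InvL m.items →
    ExtL ((toks.foldl (pass1Tok keys) m).items) L →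
    toks.foldl (stepLetter keys) (s, swapL m.items)
      = (substB keys (PySem.Dict.mk L) s toks,
         swapL ((toks.foldl (pass1Tok keys) m).items)) := by
  induction toks with
  | nil => intro s m L _ _; simp [substB]
  | cons t toks ih =>
    intro s m L hInv hExt
    simp only [List.foldl_cons] at hExt ⊢
    rw [substB_cons]
    by_cases hk : keys.contains t = true
    · have hA : stepLetter keys (s, swapL m.items) t = (s, swapL m.items) := by
        unfold stepLetter; rw [if_pos hk]
      have hB : pass1Tok keys m t = m := by
        have hcond : (!keys.contains t && !m.contains t) = false := by rw [hk]; rfl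
        unfold pass1Tok
        split
        · rename_i hx; rw [hcond] at hx; cases hx
        · rfl
      rw [hB] at hExt ⊢
      rw [hA, if_pos hk]
      exact ih s m L hInv hExt
    · have hk' : keys.contains t = false := by simpa using hk
      cases hg : m.get? t with
      | some e =>
        have hmem : (t, e) ∈ m.items := PySem.Dict.mem_items_of_get?_eq_some m hg
        have he : e ≠ "" := hInv _ hmem
        have hc : m.contains t = true := by
          rw [PySem.Dict.contains_eq_isSome_get?, hg]; rfl
        have hA : stepLetter keys (s, swapL m.items) t
            = (PySem.Str.replace s t e, swapL m.items) := by
          unfold stepLetter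
          rw [if_neg (by intro hx; rw [hk'] at hx; cases hx)]
          dsimp only
          rw [findByValue_swap, show (PySem.Dict.mk m.items) = m from rfl, hg]
          dsimp only
          rw [if_neg (by simpa using he)]
        have hB : pass1Tok keys m t = m := by
          have hcond : (!keys.contains t && !m.contains t) = false := by rw [hc]; simp
          unfold pass1Tok
          split
          · rename_i hx; rw [hcond] at hx; cases hx
          · rfl
        rw [hB] at hExt ⊢
        have hgL : (PySem.Dict.mk L).get? t = some e :=
          get?_of_extL (extL_trans (foldl_pass1Tok_ext keys toks m) hExt) hg
        rw [hA, if_neg (by intro hx; rw [hk'] at hx; cases hx), hgL]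
        exact ih (PySem.Str.replace s t e) m L hInv hExt
      | none =>
        have hc : m.contains t = false := by
          rw [PySem.Dict.contains_eq_isSome_get?, hg]; rfl
        have hlen : ((swapL m.items).length : Int) + 1 = (m.size : Int) + 1 := by
          simp [swapL, PySem.Dict.size]
        have hA : stepLetter keys (s, swapL m.items) t
            = (PySem.Str.replace s t (xName ((m.size : Int) + 1)),
               swapL m.items ++ [(xName ((m.size : Int) + 1), t)]) := by
          unfold stepLetter
          rw [if_neg (by intro hx; rw [hk'] at hx; cases hx)]
          dsimp only
          rw [findByValue_swap, show (PySem.Dict.mk m.items) = m from rfl, hg]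
          dsimp only
          rw [hlen]
        have hB : pass1Tok keys m t = m.insert t (xName ((m.size : Int) + 1)) := by
          have hcond : (!keys.contains t && !m.contains t) = true := by rw [hk', hc]; rfl
          unfold pass1Tok
          split
          · rfl
          · rename_i hx; exact absurd hcond hx
        have hitems : (m.insert t (xName ((m.size : Int) + 1))).items
            = m.items ++ [(t, xName ((m.size : Int) + 1))] :=
          PySem.Dict.items_insert_of_not_contains m _ hc
        have hswap : swapL m.items ++ [(xName ((m.size : Int) + 1), t)]
            = swapL ((m.insert t (xName ((m.size : Int) + 1))).items) := by
          rw [hitems]; simp [swapL]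
        have hInv' : InvL (m.insert t (xName ((m.size : Int) + 1))).items := by
          rw [hitems]
          intro p hp
          rcases List.mem_append.mp hp with h1 | h1
          · exact hInv p h1
          · have : p = (t, xName ((m.size : Int) + 1)) := by simpa using h1
            rw [this]
            exact xName_ne_empty _
        rw [hB] at hExt ⊢
        have hgm' : (PySem.Dict.mk (m.insert t (xName ((m.size : Int) + 1))).items).get? t
            = some (xName ((m.size : Int) + 1)) := by
          rw [hitems, get?_append_or, show (PySem.Dict.mk m.items) = m from rfl, hg]
          rw [PySem.Dict.get?_mk_cons]
          simp
        have hgL : (PySem.Dict.mk L).get? t = some (xName ((m.size : Int) + 1)) :=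
          get?_of_extL
            (extL_trans (foldl_pass1Tok_ext keys toks (m.insert t (xName ((m.size : Int) + 1)))) hExt)
            hgm'
        rw [hA, hswap, if_neg (by intro hx; rw [hk'] at hx; cases hx), hgL]
        exact ih (PySem.Str.replace s t (xName ((m.size : Int) + 1)))
          (m.insert t (xName ((m.size : Int) + 1))) L hInv' hExt

-- ---- per-value-list and per-entries loops ----

lemma pass2Value_cons (keys : List String) (M : PySem.Dict String String) (v : String)
    (value : List String) (o : Option (List String)) (os : List (Option (List String))) :
    pass2Value keys M (v :: value) (o :: os)
      = (match o with
          | none => v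
          | some toks => substB keys M v toks) :: pass2Value keys M value os := by
  simp [pass2Value]

lemma proc_value (keys : List String) (value : List String) :
    ∀ (m : PySem.Dict String String) (L : List (String × String)),
    (∀ v ∈ value, preV v = true) → InvL m.items →
    ExtL ((pass1Value keys value m).2.items) L →
    procValue keys value (swapL m.items)
      = some (pass2Value keys (PySem.Dict.mk L) value (pass1Value keys value m).1,
              swapL ((pass1Value keys value m).2.items)) := by
  induction value with
  | nil => intro m L _ _ _; simp [procValue, pass1Value, pass2Value]
  | cons v rest ih =>
    intro m L hpre hInv hExt
    have hv : preV v = true := hpre v List.mem_cons_self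
    have hrest : ∀ u ∈ rest, preV u = true := fun u hu => hpre u (List.mem_cons_of_mem _ hu)
    unfold procValue
    rw [splitT_eq_tokensB v hv]
    unfold pass1Value at hExt ⊢
    dsimp only at hExt ⊢
    by_cases h2 : ((tokensB v).length == 2) = true
    · simp only [if_pos h2] at hExt ⊢
      have hExt' : ExtL ((pass1Value keys rest ((tokensB v).foldl (pass1Tok keys) m)).2.items) L := hExt
      have hst := step_toks keys (tokensB v) v m L hInv
        (extL_trans (pass1Value_ext keys rest ((tokensB v).foldl (pass1Tok keys) m)) hExt')
      rw [hst]
      dsimp only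
      rw [ih ((tokensB v).foldl (pass1Tok keys) m) L hrest
        (foldl_pass1Tok_inv keys (tokensB v) m hInv) hExt']
      rw [pass2Value_cons]
    · simp only [if_neg h2] at hExt ⊢
      rw [ih m L hrest hInv hExt]
      rw [pass2Value_cons]

lemma pass1_ext_aux (keys : List String) (entries : List (String × List String)) :
    ∀ m, ExtL m.items ((pass1 keys entries m).2.items) := by
  induction entries with
  | nil => intro m; exact extL_refl _
  | cons kv rest ih =>
    intro m
    unfold pass1
    dsimp only
    exact extL_trans (pass1Value_ext keys kv.2 m) (ih _)

lemma proc_entries (keys : List String) (entries : List (String × List String)) :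
    ∀ (m : PySem.Dict String String) (L : List (String × String)),
    (∀ kv ∈ entries, ∀ v ∈ kv.2, preV v = true) → InvL m.items →
    ExtL ((pass1 keys entries m).2.items) L →
    procEntries keys entries (swapL m.items)
      = some ((entries.zip (pass1 keys entries m).1).map
                (fun p => (p.1.1, pass2Value keys (PySem.Dict.mk L) p.1.2 p.2)),
              swapL ((pass1 keys entries m).2.items)) := by
  induction entries with
  | nil => intro m L _ _ _; simp [procEntries, pass1]
  | cons kv rest ih =>
    intro m L hpre hInv hExt
    unfold procEntries
    unfold pass1 at hExt ⊢
    dsimp only at hExt ⊢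
    have h1 := proc_value keys kv.2 m L (hpre kv List.mem_cons_self) hInv
      (extL_trans (pass1_ext_aux keys rest ((pass1Value keys kv.2 m).2)) hExt)
    rw [h1]
    dsimp only
    rw [ih ((pass1Value keys kv.2 m).2) L
      (fun u hu => hpre u (List.mem_cons_of_mem _ hu))
      (pass1Value_inv keys kv.2 m hInv) hExt]
    rfl

-- ===== VERDICT (by name: the statement is the Claim_ definition above) =====

theorem delete_terminals_spec : Claim_equal_delete_terminals := by
  unfold Claim_equal_delete_terminals
  intro d _ hpre
  unfold Spec_delete_terminals
  have hpre' : ∀ kv ∈ d, ∀ v ∈ kv.2, preV v = true := by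
    unfold Pre_delete_terminals at hpre
    intro kv hkv v hv
    exact List.all_eq_true.mp (List.all_eq_true.mp hpre kv hkv) v hv
  unfold delete_terminals delete_terminals_alt
  have h := proc_entries (d.map Prod.fst) d PySem.Dict.empty
      ((pass1 (d.map Prod.fst) d PySem.Dict.empty).2.items) hpre'
      (by intro p hp; cases hp)
      (extL_refl _)
  rw [show swapL (PySem.Dict.empty : PySem.Dict String String).items = ([] : List (String × String)) from rfl] at h
  rw [h]
  dsimp only
  rw [show swapL ((pass1 (d.map Prod.fst) d PySem.Dict.empty).2.items)
        = ((pass1 (d.map Prod.fst) d PySem.Dict.empty).2.items).map (fun p => (p.2, p.1)) from rfl]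
  rw [List.foldl_map]
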